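-- pv_equiv track=rewrite | github.com/JohnReilly70/Python-Exercises | Exercise.py | letter_alphabet_dict
-- ===== SOURCE A (Python) =====
-- def letter_alphabet_dict(word_list, pos):
--     alphabet_dict = {}
--     for word in word_list:
--         if word[pos] not in alphabet_dict:
--             alphabet_dict[word[pos]] = [word]
--         else:
--             temp_dict_list = alphabet_dict[word[pos]]
--             temp_dict_list.append(word)
--             alphabet_dict[word[pos]] = temp_dict_list
--     return alphabet_dict
-- ===== SOURCE B (Python) =====
-- def letter_alphabet_dict(word_list, pos):
--     # Two-pass: first collect the distinct key letters in first-occurrence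
--     # order, then build each bucket by a scan of the whole list per key.
--     keys = []
--     for word in word_list:
--         letter = word[pos]
--         if letter not in keys:
--             keys.append(letter)
--     return {letter: [w for w in word_list if w[pos] == letter] for letter in keys}
-- ===== Notes on version B (the rewrite author's own statement) =====
-- stated objective: alternative
-- what changed: Replaces the single hash-bucketing pass (dict built incrementally, appending to a bucket per word) with a two-pass scheme: one pass collects the distinct key letters in first-occurrence order, then each bucket is built by a full-list comprehension filter per key.
import Mathlib
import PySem

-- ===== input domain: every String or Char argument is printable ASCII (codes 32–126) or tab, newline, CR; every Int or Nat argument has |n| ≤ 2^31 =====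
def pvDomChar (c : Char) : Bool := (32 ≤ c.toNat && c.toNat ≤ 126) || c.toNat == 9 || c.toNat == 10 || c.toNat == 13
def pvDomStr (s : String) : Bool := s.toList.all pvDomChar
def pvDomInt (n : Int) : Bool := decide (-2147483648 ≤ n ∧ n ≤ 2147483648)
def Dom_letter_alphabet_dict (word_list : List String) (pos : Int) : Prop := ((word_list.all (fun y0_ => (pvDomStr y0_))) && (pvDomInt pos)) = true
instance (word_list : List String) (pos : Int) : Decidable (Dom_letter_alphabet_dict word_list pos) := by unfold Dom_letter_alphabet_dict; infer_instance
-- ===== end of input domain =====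

-- B replaces A's single hash-bucketing pass by a two-pass scheme (collect distinct keys in
-- first-occurrence order, then one full-list filter per key); same result, not faster (alternative).

-- word[pos] as Python computes it: a one-character string (none = IndexError)
def pvKey (pos : Int) (w : String) : Option String :=
  (PySem.Str.pyGet? w pos).map (fun c => String.ofList [c])

-- ===== PORT A =====
def letter_alphabet_dict (word_list : List String) (pos : Int) : List (String × List String) :=
  (word_list.foldl (fun (d : PySem.Dict String (List String)) word =>
      match pvKey pos word with
      | none => d
      | some k =>
        if d.contains k = false then d.insert k [word]
        else d.insert k (d.getD k [] ++ [word])) PySem.Dict.empty).items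

-- ===== PORT B =====
def letter_alphabet_dict_alt (word_list : List String) (pos : Int) : List (String × List String) :=
  (word_list.foldl (fun (ks : List String) word =>
      match pvKey pos word with
      | none => ks
      | some letter => if letter ∈ ks then ks else ks ++ [letter]) []).map
    (fun letter => (letter, word_list.filter (fun w => pvKey pos w == some letter)))

-- ===== PRECONDITION & SPEC =====
-- Pre_ excludes exactly the inputs where some word[pos] raises IndexError in Python.
def Pre_letter_alphabet_dict (word_list : List String) (pos : Int) : Prop :=
  ∀ w ∈ word_list, PySem.Raise.InRange w.toList.length pos
instance (word_list : List String) (pos : Int) : Decidable (Pre_letter_alphabet_dict word_list pos) := by unfold Pre_letter_alphabet_dict; infer_instance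

def pvWitness_letter_alphabet_dict : List String × Int := (["apple", "ant", "bee"], 0)

def Spec_letter_alphabet_dict (word_list : List String) (pos : Int) (out : List (String × List String)) : Prop := out = letter_alphabet_dict_alt word_list pos
instance (word_list : List String) (pos : Int) (out : List (String × List String)) : Decidable (Spec_letter_alphabet_dict word_list pos out) := by unfold Spec_letter_alphabet_dict; infer_instance

-- ===== CLAIM (what is proved, stated in full; the proofs are below) =====
def Claim_equal_letter_alphabet_dict : Prop := ∀ (word_list : List String) (pos : Int), Dom_letter_alphabet_dict word_list pos → Pre_letter_alphabet_dict word_list pos → Spec_letter_alphabet_dict word_list pos (letter_alphabet_dict word_list pos)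

-- ===== LEMMAS AND PROOFS =====

-- the (key, word) pairs of the words whose index is in range, in order
def pvPairs (word_list : List String) (pos : Int) : List (String × String) :=
  word_list.filterMap (fun w => (pvKey pos w).map (fun k => (k, w)))

-- A's if/else step is Dict.modify
theorem pvStepA_eq_modify (d : PySem.Dict String (List String)) (k word : String) :
    (if d.contains k = false then d.insert k [word]
     else d.insert k (d.getD k [] ++ [word])) = d.modify k [] (· ++ [word]) := by
  by_cases h : d.contains k
  · simp [PySem.Dict.modify, h]
  · simp only [Bool.not_eq_true] at h
    simp [PySem.Dict.modify, h, PySem.Dict.getD_of_not_contains _ _ h]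

-- A's fold over words is the modify-fold over the pairs
theorem pvFoldA (word_list : List String) (pos : Int) (d : PySem.Dict String (List String)) :
    word_list.foldl (fun d word =>
      match pvKey pos word with
      | none => d
      | some k =>
        if d.contains k = false then d.insert k [word]
        else d.insert k (d.getD k [] ++ [word])) d
    = (pvPairs word_list pos).foldl (fun d p => d.modify p.1 [] (· ++ [p.2])) d := by
  induction word_list generalizing d with
  | nil => rfl
  | cons w ws ih =>
    simp only [List.foldl_cons, pvPairs, List.filterMap_cons]
    cases h : pvKey pos w with
    | none => simpa [h, pvPairs] using ih d
    | some k =>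
      simp only [Option.map_some, List.foldl_cons]
      rw [pvStepA_eq_modify]
      simpa [pvPairs] using ih _

-- B's key-collecting fold is the Set.add fold over the pairs' keys
theorem pvFoldK (word_list : List String) (pos : Int) (ks : List String) :
    word_list.foldl (fun ks word =>
      match pvKey pos word with
      | none => ks
      | some letter => if letter ∈ ks then ks else ks ++ [letter]) ks
    = (pvPairs word_list pos).foldl (fun s p => PySem.Set.add s p.1) ks := by
  induction word_list generalizing ks with
  | nil => rfl
  | cons w ws ih =>
    simp only [List.foldl_cons, pvPairs, List.filterMap_cons]
    cases h : pvKey pos w with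
    | none => simpa [h, pvPairs] using ih ks
    | some k =>
      simp only [Option.map_some, List.foldl_cons]
      rw [PySem.Set.add_eq_ite]
      simpa [pvPairs] using ih _

-- each bucket: the pairs with key k, projected, are the words whose key is k
theorem pvBucket (word_list : List String) (pos : Int) (k : String) :
    ((pvPairs word_list pos).filter (fun p => p.1 == k)).map (·.2)
      = word_list.filter (fun w => pvKey pos w == some k) := by
  induction word_list with
  | nil => rfl
  | cons w ws ih =>
    simp only [pvPairs, List.filterMap_cons] at *
    cases h : pvKey pos w with
    | none => simpa [h] using ih
    | some a =>
      by_cases ha : a = k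
      · subst ha; simpa [h] using ih
      · simp only [h, Option.map_some, List.filter_cons]
        simpa [h, ha] using ih

-- ===== VERDICT (by name: the statement is the Claim_ definition above) =====
theorem letter_alphabet_dict_spec : Claim_equal_letter_alphabet_dict := by
  intro word_list pos _ _
  unfold Spec_letter_alphabet_dict letter_alphabet_dict letter_alphabet_dict_alt
  rw [pvFoldA, pvFoldK]
  have hfold : ∀ (l : List (String × String)) (d : PySem.Dict String (List String)),
      l.foldl (fun d p => d.modify p.1 [] (· ++ [p.2])) d
        = l.foldl (fun d x => d.modify ((·.1) x) [] ((fun _ x v => v ++ [x.2]) d x)) d := by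
    intro l d; rfl
  rw [PySem.Dict.items_eq_map_keys _ (by
        rw [hfold]
        exact PySem.Dict.nodup_keys_foldl_modify_key _ _ _ _ _ (by simp)) []]
  rw [hfold, PySem.Dict.keys_foldl_modify_key]
  rw [← hfold]
  have hkeys : PySem.Set.update (PySem.Dict.empty (κ := String) (ν := List String)).keys
      ((pvPairs word_list pos).map (·.1))
      = (pvPairs word_list pos).foldl (fun s p => PySem.Set.add s p.1) [] := by
    rw [show (PySem.Dict.empty (κ := String) (ν := List String)).keys = [] from rfl,
        PySem.Set.update_map_eq_foldl_add]
  rw [hkeys]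
  apply List.map_congr_left
  intro k _
  rw [PySem.Dict.getD_foldl_modify_append, pvBucket]
  simp
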